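-- pv_equiv track=rewrite | github.com/Amroe1212/CT-caeser-cipher- | CT caeser cipher.py | most_common_double_letter
-- ===== SOURCE A (Python) =====
-- def most_common_double_letter(text):
--     """Find the most frequently occurring double letter (consecutive identical letters)."""
--     double_letter_count = {}
--     text_lower = text.lower()
--
--     for i in range(len(text_lower) - 1):
--         if text_lower[i].isalpha() and text_lower[i] == text_lower[i + 1]:
--             double = text_lower[i:i+2]
--             double_letter_count[double] = double_letter_count.get(double, 0) + 1
--
--     if not double_letter_count:
--         return None
--
--     return max(double_letter_count, key=double_letter_count.get)
-- ===== SOURCE B (Python) =====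
-- def most_common_double_letter(text):
--     """Find the most frequently occurring double letter (consecutive identical letters)."""
--     t = text.lower()
--     n = len(t)
--     counts = {}
--     i = 0
--     while i < n:
--         j = i + 1
--         while j < n and t[j] == t[i]:
--             j += 1
--         if t[i].isalpha() and j - i >= 2:
--             key = t[i] * 2
--             counts[key] = counts.get(key, 0) + (j - i - 1)
--         i = j
--     if not counts:
--         return None
--     return max(counts, key=counts.get)
-- ===== Notes on version B (the rewrite author's own statement) =====
-- stated objective: alternative
-- what changed: B replaces A's overlapping adjacent-pair index scan (one dict increment per matching pair, key built by slicing) with a single run-length grouping pass: each maximal run of an identical letter of length L >= 2 credits L-1 to its key at once.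
import Mathlib
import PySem

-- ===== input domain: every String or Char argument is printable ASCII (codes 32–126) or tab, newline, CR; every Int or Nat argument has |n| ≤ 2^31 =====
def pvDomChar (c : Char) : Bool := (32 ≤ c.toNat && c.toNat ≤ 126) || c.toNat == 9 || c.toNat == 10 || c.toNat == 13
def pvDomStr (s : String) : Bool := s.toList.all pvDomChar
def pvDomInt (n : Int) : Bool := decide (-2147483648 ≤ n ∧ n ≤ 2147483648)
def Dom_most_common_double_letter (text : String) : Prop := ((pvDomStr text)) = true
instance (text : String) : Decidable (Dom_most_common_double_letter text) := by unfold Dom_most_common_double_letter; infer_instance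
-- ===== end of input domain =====

-- B replaces A's overlapping adjacent-pair index scan by a single run-length grouping pass
-- (each maximal run of an identical letter of length L contributes L-1 at once); objective: alternative decomposition, same O(n) cost.

-- ===== PORT A =====
-- loop body of A: `if text_lower[i].isalpha() and text_lower[i] == text_lower[i+1]: d[t[i:i+2]] = d.get(t[i:i+2], 0) + 1`
-- (indices i and i+1 are always in range inside `range(len-1)`, so the default of pyGetD is never read)
def aStep (tl : List Char) (d : PySem.Dict String Int) (i : Int) : PySem.Dict String Int :=
  if PySem.Chars.isalpha (PySem.List.pyGetD tl i ' ') &&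
     (PySem.List.pyGetD tl i ' ' == PySem.List.pyGetD tl (i + 1) ' ') then
    let double := String.ofList (PySem.List.slice tl (some i) (some (i + 2)))
    d.insert double (d.getD double 0 + 1)
  else d

def most_common_double_letter (text : String) : Option String :=
  let tl := PySem.Chars.lower text.toList
  let d := (PySem.List.pyRange 0 ((tl.length : Int) - 1)).foldl (aStep tl) PySem.Dict.empty
  if d.size = 0 then none
  else PySem.List.max? d.keys (fun k => d.getD k 0)

-- ===== PORT B =====
-- outer while loop of B: take one maximal run of the current character (the inner while loop is the
-- takeWhile/dropWhile pair), credit L-1 doubles to the key if it is a letter and L >= 2, continue after the run.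
def bLoop : List Char → PySem.Dict String Int → PySem.Dict String Int
  | [], d => d
  | c :: rest, d =>
    let L : Nat := 1 + (rest.takeWhile (· == c)).length
    let d' := if PySem.Chars.isalpha c && decide (2 ≤ L) then
        let key := String.ofList [c, c]
        d.insert key (d.getD key 0 + ((L : Int) - 1))
      else d
    bLoop (rest.dropWhile (· == c)) d'
termination_by l _ => l.length
decreasing_by
  simpa using Nat.lt_succ_of_le (List.length_dropWhile_le _ _)

def most_common_double_letter_alt (text : String) : Option String :=
  let t := PySem.Chars.lower text.toList
  let d := bLoop t PySem.Dict.empty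
  if d.size = 0 then none
  else PySem.List.max? d.keys (fun k => d.getD k 0)

-- ===== PRECONDITION & SPEC =====
def Spec_most_common_double_letter (text : String) (out : Option String) : Prop := out = most_common_double_letter_alt text
instance (text : String) (out : Option String) : Decidable (Spec_most_common_double_letter text out) := by unfold Spec_most_common_double_letter; infer_instance

-- ===== CLAIM (what is proved, stated in full; the proofs are below) =====
def Claim_equal_most_common_double_letter : Prop := ∀ (text : String), Dom_most_common_double_letter text → Spec_most_common_double_letter text (most_common_double_letter text)

-- ===== LEMMAS AND PROOFS =====

-- A's loop, re-expressed as a structural recursion over adjacent pairs.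
def pairScan : List Char → PySem.Dict String Int → PySem.Dict String Int
  | a :: b :: rest, d =>
    pairScan (b :: rest)
      (if PySem.Chars.isalpha a && (a == b) then
         d.insert (String.ofList [a, b]) (d.getD (String.ofList [a, b]) 0 + 1)
       else d)
  | _, d => d

-- one double-letter increment for character c (A's dict update when the pair (c, c) fires)
def upd (c : Char) (d : PySem.Dict String Int) : PySem.Dict String Int :=
  if PySem.Chars.isalpha c then
    d.insert (String.ofList [c, c]) (d.getD (String.ofList [c, c]) 0 + 1)
  else d

theorem aStep_zero (a b : Char) (rest : List Char) (d : PySem.Dict String Int) :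
    aStep (a :: b :: rest) d 0 =
      (if PySem.Chars.isalpha a && (a == b) then
         d.insert (String.ofList [a, b]) (d.getD (String.ofList [a, b]) 0 + 1)
       else d) := by
  have hp : (0:Int) ≤ (rest.length : Int) + 1 := by positivity
  simp [aStep, PySem.List.pyGetD, PySem.List.pyGet?, PySem.List.pyIdx?, PySem.List.slice, hp]

theorem aStep_shift (x : Char) (tl : List Char) (d : PySem.Dict String Int) (k : Nat) :
    aStep (x :: tl) d ((k : Int) + 1) = aStep tl d (k : Int) := by
  have h1 : ((k : Int) + 1) = ((k + 1 : Nat) : Int) := by push_cast; ring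
  have h3 : ((k : Int) + 1 + 2) = ((k + 1 : Nat) : Int) + ((2 : Nat) : Int) := by push_cast; ring
  have h2 : ((k : Int) + 2) = ((k : Nat) : Int) + ((2 : Nat) : Int) := by push_cast; ring
  unfold aStep
  rw [h3, h1, h2, PySem.List.slice_natCast_add, PySem.List.slice_natCast_add,
      PySem.List.pyGetD_natCast, PySem.List.pyGetD_natCast]
  have h4 : ((k + 1 : Nat) : Int) + 1 = ((k + 2 : Nat) : Int) := by push_cast; ring
  rw [h4, PySem.List.pyGetD_natCast, PySem.List.pyGetD_natCast]
  simp

theorem foldA_eq_pairScan (tl : List Char) (d : PySem.Dict String Int) :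
    (List.range (tl.length - 1)).foldl (fun d (k : Nat) => aStep tl d (k : Int)) d = pairScan tl d := by
  induction tl generalizing d with
  | nil => simp [pairScan]
  | cons a tail ih =>
    cases tail with
    | nil => simp [pairScan]
    | cons b rest =>
      have hlen : (a :: b :: rest).length - 1 = rest.length + 1 := by simp
      have hstep0 : aStep (a :: b :: rest) d ((0:Nat) : Int) =
          (if PySem.Chars.isalpha a && (a == b) then
             d.insert (String.ofList [a, b]) (d.getD (String.ofList [a, b]) 0 + 1)
           else d) := aStep_zero a b rest d
      have hbody : ∀ (d' : PySem.Dict String Int) (k : Nat),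
          aStep (a :: b :: rest) d' (((k + 1 : Nat)) : Int) = aStep (b :: rest) d' ((k : Nat) : Int) := by
        intro d' k
        have := aStep_shift a (b :: rest) d' k
        rwa [show ((k : Int) + 1) = ((k + 1 : Nat) : Int) by push_cast; ring] at this
      rw [hlen, List.range_succ_eq_map, List.foldl_cons, List.foldl_map]
      simp only [Nat.succ_eq_add_one]
      have hc := PySem.List.foldl_congr_mem
            (l := List.range rest.length)
            (init := aStep (a :: b :: rest) d ((0:Nat) : Int))
            (f := fun (x : PySem.Dict String Int) (y : Nat) => aStep (a :: b :: rest) x ((y + 1 : Nat) : Int))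
            (g := fun d' (k : Nat) => aStep (b :: rest) d' (k : Int))
            (by intro acc x _; exact hbody acc x)
      rw [hc]
      rw [hstep0]
      have ih' := ih (d := (if PySem.Chars.isalpha a && (a == b) then
             d.insert (String.ofList [a, b]) (d.getD (String.ofList [a, b]) 0 + 1)
           else d))
      rw [show (b :: rest).length - 1 = rest.length by simp] at ih'
      rw [ih']
      rfl

theorem iterate_upd (c : Char) (n : Nat) (hn : 1 ≤ n) (d : PySem.Dict String Int)
    (ha : PySem.Chars.isalpha c = true) :
    (upd c)^[n] d = d.insert (String.ofList [c, c]) (d.getD (String.ofList [c, c]) 0 + (n : Int)) := by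
  induction n with
  | zero => omega
  | succ m ihm =>
    rcases Nat.eq_or_lt_of_le hn with h1 | h2
    · simp [← h1, upd, ha]
    · rw [Function.iterate_succ_apply', ihm (by omega)]
      simp [upd, ha, PySem.Dict.getD_insert_self, PySem.Dict.insert_insert_self]
      congr 1
      omega

theorem pairScan_run (c : Char) (run : List Char) (h : ∀ x ∈ run, (x == c) = true)
    (rest' : List Char) (d : PySem.Dict String Int) :
    pairScan (c :: (run ++ rest')) d = pairScan (c :: rest') ((upd c)^[run.length] d) := by
  induction run generalizing d with
  | nil => rfl
  | cons x run' ihr =>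
    have hx : x = c := by
      have := h x (by simp)
      exact eq_of_beq this
    subst hx
    simp only [List.cons_append]
    have hstep : pairScan (x :: x :: (run' ++ rest')) d = pairScan (x :: (run' ++ rest')) (upd x d) := by
      rw [show pairScan (x :: x :: (run' ++ rest')) d = pairScan (x :: (run' ++ rest'))
            (if PySem.Chars.isalpha x && (x == x) then
               d.insert (String.ofList [x, x]) (d.getD (String.ofList [x, x]) 0 + 1)
             else d) from rfl]
      simp [upd]
    rw [hstep, ihr (fun y hy => h y (by simp [hy])), ← Function.iterate_succ_apply]
    rfl

theorem head_dropWhile_false {p : Char → Bool} {l : List Char} {h : Char} {t' : List Char}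
    (hh : l.dropWhile p = h :: t') : p h = false := by
  induction l with
  | nil => simp at hh
  | cons a l ih =>
    rw [List.dropWhile_cons] at hh
    split at hh
    · exact ih hh
    · next hpa => cases hh; simpa using hpa

theorem pairScan_eq_bLoop_aux (N : Nat) : ∀ (tl : List Char), tl.length ≤ N →
    ∀ (d : PySem.Dict String Int), pairScan tl d = bLoop tl d := by
  induction N with
  | zero =>
    intro tl hl d
    rw [List.length_eq_zero_iff.mp (Nat.le_zero.mp hl)]
    simp [pairScan, bLoop]
  | succ N ih =>
    intro tl hl d
    cases tl with
    | nil => simp [pairScan, bLoop]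
    | cons c rest =>
      have hsplit : rest.takeWhile (· == c) ++ rest.dropWhile (· == c) = rest :=
        List.takeWhile_append_dropWhile
      have hmem : ∀ x ∈ rest.takeWhile (· == c), (x == c) = true :=
        fun x hx => by simpa using List.mem_takeWhile_imp (p := (· == c)) hx
      have h1 : pairScan (c :: rest) d =
          pairScan (c :: rest.dropWhile (· == c))
            ((upd c)^[(rest.takeWhile (· == c)).length] d) := by
        conv_lhs => rw [← hsplit]
        exact pairScan_run c _ hmem _ d
      have hd' : (upd c)^[(rest.takeWhile (· == c)).length] d =
          (if PySem.Chars.isalpha c && decide (2 ≤ 1 + (rest.takeWhile (· == c)).length) then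
             d.insert (String.ofList [c, c])
               (d.getD (String.ofList [c, c]) 0 + (((1 + (rest.takeWhile (· == c)).length : Nat) : Int) - 1))
           else d) := by
        by_cases hn0 : (rest.takeWhile (· == c)).length = 0
        · simp [hn0]
        · by_cases ha : PySem.Chars.isalpha c
          · rw [iterate_upd c _ (by omega) d ha]
            simp only [ha, Bool.true_and, decide_eq_true_eq]
            rw [if_pos (by omega)]
            congr 1
            push_cast
            ring
          · rw [Function.iterate_fixed (by simp [upd, ha]) _]
            simp [ha]
      have h2 : ∀ d'' : PySem.Dict String Int,
          pairScan (c :: rest.dropWhile (· == c)) d'' = bLoop (rest.dropWhile (· == c)) d'' := by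
        intro d''
        cases hdw : rest.dropWhile (· == c) with
        | nil => simp [pairScan, bLoop]
        | cons h t =>
          have hhc : (h == c) = false := head_dropWhile_false (p := fun x => x == c) hdw
          have hch : (c == h) = false := by rw [BEq.comm]; exact hhc
          have hstep : pairScan (c :: h :: t) d'' = pairScan (h :: t) d'' := by
            rw [show pairScan (c :: h :: t) d'' = pairScan (h :: t)
                  (if PySem.Chars.isalpha c && (c == h) then
                     d''.insert (String.ofList [c, h]) (d''.getD (String.ofList [c, h]) 0 + 1)
                   else d'') from rfl]
            rw [hch]
            simp
          rw [hstep]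
          apply ih
          have hle : (rest.dropWhile (· == c)).length ≤ rest.length :=
            List.length_dropWhile_le _ _
          rw [hdw] at hle
          have : rest.length ≤ N := by simpa using hl
          omega
      rw [h1, hd', h2]
      rw [show bLoop (c :: rest) d =
            bLoop (rest.dropWhile (· == c))
              (if PySem.Chars.isalpha c && decide (2 ≤ 1 + (rest.takeWhile (· == c)).length) then
                 d.insert (String.ofList [c, c])
                   (d.getD (String.ofList [c, c]) 0 + (((1 + (rest.takeWhile (· == c)).length : Nat) : Int) - 1))
               else d) from by rw [bLoop]]

theorem pairScan_eq_bLoop (tl : List Char) (d : PySem.Dict String Int) :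
    pairScan tl d = bLoop tl d :=
  pairScan_eq_bLoop_aux tl.length tl le_rfl d

theorem dicts_eq (tl : List Char) :
    (PySem.List.pyRange 0 ((tl.length : Int) - 1)).foldl (aStep tl) PySem.Dict.empty =
      bLoop tl PySem.Dict.empty := by
  cases hl : tl.length with
  | zero =>
    rw [List.length_eq_zero_iff.mp hl]
    rw [show bLoop [] PySem.Dict.empty = PySem.Dict.empty from by simp [bLoop]]
    decide
  | succ m =>
    have hm : (((m + 1 : Nat) : Int) - 1) = ((m : Nat) : Int) := by push_cast; ring
    rw [hm, PySem.List.pyRange_zero_natCast, List.foldl_map]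
    have hfa := foldA_eq_pairScan tl PySem.Dict.empty
    rw [show tl.length - 1 = m by omega] at hfa
    rw [hfa, pairScan_eq_bLoop]

-- ===== VERDICT (by name: the statement is the Claim_ definition above) =====
theorem most_common_double_letter_spec : Claim_equal_most_common_double_letter := by
  intro text _
  unfold Spec_most_common_double_letter
  simp only [most_common_double_letter, most_common_double_letter_alt]
  rw [dicts_eq]
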